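-- pv_equiv track=rewrite | github.com/KatarzynaDudziak/ChristmasChallenge | Day23_Christmas_bow.py | draw_bow
-- ===== SOURCE A (Python) =====
-- def draw_bow(length):
--     board = [['   '] * length for _ in range(length)]
--
--     for i in range(length):
--         board[i][0] = '\033[94m' + ' * '
--         board[i][length - 1] = ' * ' + '\033[94m'
--     for i in range(length):
--         board[i][i] = ' * ' + '\033[94m'
--         board[i][length - 1 - i] = ' * ' + '\033[94m'
--     return board
-- ===== SOURCE B (Python) =====
-- def draw_bow(length):
--     def cell(i, j):
--         if j == i or j == length - 1 - i or j == length - 1: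
--             return ' * ' + '\033[94m'
--         if j == 0 and 0 < i < length - 1:
--             return '\033[94m' + ' * '
--         return '   '
--     top = [[cell(i, j) for j in range(length)] for i in range((length + 1) // 2)]
--     return top + top[:length // 2][::-1]
-- ===== Notes on version B (the rewrite author's own statement) =====
-- stated objective: alternative
-- what changed: B computes each cell's final value directly from its coordinates with a pure closed-form cell function (no board mutation or overwriting at all), builds only the top ceil(n/2) rows that way, and obtains the bottom rows by mirroring (the pattern is vertically symmetric), instead of A's allocate-then-three-overwrite-passes over a mutable board.
import Mathlib
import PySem

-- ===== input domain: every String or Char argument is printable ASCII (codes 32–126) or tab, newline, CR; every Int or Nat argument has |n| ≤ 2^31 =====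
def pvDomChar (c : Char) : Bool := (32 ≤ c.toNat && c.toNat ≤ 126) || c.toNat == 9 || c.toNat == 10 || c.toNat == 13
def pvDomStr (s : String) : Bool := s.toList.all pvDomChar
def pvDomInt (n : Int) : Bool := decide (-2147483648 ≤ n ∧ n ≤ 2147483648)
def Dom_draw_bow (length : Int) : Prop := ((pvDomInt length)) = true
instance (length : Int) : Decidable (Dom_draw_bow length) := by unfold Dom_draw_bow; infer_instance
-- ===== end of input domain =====

-- B computes every cell directly from its coordinates with a pure closed-form cell
-- function (no board mutation), builds only the top ceil(n/2) rows and mirrors them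
-- for the bottom (the pattern is vertically symmetric); objective: alternative.

-- ===== PORT A =====
-- body of A's first loop: board[i][0] = '\x1b[94m' + ' * '; board[i][length-1] = ' * ' + '\x1b[94m'
def pvStepA1 (length : Int) (b : List (List String)) (i : Int) : List (List String) :=
  let b := PySem.List.pySetD b i
    (PySem.List.pySetD (PySem.List.pyGetD b i []) 0 ("\x1b[94m" ++ " * "))
  PySem.List.pySetD b i
    (PySem.List.pySetD (PySem.List.pyGetD b i []) (length - 1) (" * " ++ "\x1b[94m"))

-- body of A's second loop: board[i][i] = ' * ' + '\x1b[94m'; board[i][length-1-i] = ' * ' + '\x1b[94m'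
def pvStepA2 (length : Int) (b : List (List String)) (i : Int) : List (List String) :=
  let b := PySem.List.pySetD b i
    (PySem.List.pySetD (PySem.List.pyGetD b i []) i (" * " ++ "\x1b[94m"))
  PySem.List.pySetD b i
    (PySem.List.pySetD (PySem.List.pyGetD b i []) (length - 1 - i) (" * " ++ "\x1b[94m"))

def draw_bow (length : Int) : List (List String) :=
  let board := List.replicate length.toNat (List.replicate length.toNat "   ")
  let board := (PySem.List.pyRange 0 length 1).foldl (pvStepA1 length) board
  (PySem.List.pyRange 0 length 1).foldl (pvStepA2 length) board

-- ===== PORT B =====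
-- B's inner 'cell(i, j)' helper, literally
def pvCellB (length i j : Int) : String :=
  if j = i ∨ j = length - 1 - i ∨ j = length - 1 then " * " ++ "\x1b[94m"
  else if j = 0 ∧ 0 < i ∧ i < length - 1 then "\x1b[94m" ++ " * "
  else "   "

-- top + top[:length//2][::-1]; '[::-1]' is List.reverse (PySem.List.slice?_none_none_neg_one)
def draw_bow_alt (length : Int) : List (List String) :=
  let top := (PySem.List.pyRange 0 (PySem.Int.floordiv (length + 1) 2) 1).map
    (fun i => (PySem.List.pyRange 0 length 1).map (fun j => pvCellB length i j))
  top ++ (PySem.List.slice top none (some (PySem.Int.floordiv length 2))).reverse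

-- ===== PRECONDITION & SPEC =====
def Spec_draw_bow (length : Int) (out : List (List String)) : Prop := out = draw_bow_alt length
instance (length : Int) (out : List (List String)) : Decidable (Spec_draw_bow length out) := by unfold Spec_draw_bow; infer_instance

-- ===== CLAIM (what is proved, stated in full; the proofs are below) =====
def Claim_equal_draw_bow : Prop := ∀ (length : Int), Dom_draw_bow length → Spec_draw_bow length (draw_bow length)

-- ===== LEMMAS AND PROOFS =====

-- net effect of one iteration of A's loops on row i of the board (Nat-indexed)
def pvG1 (n : ℕ) (row : List String) : List String :=
  (row.set 0 ("\x1b[94m" ++ " * ")).set (n-1) (" * " ++ "\x1b[94m")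
def pvG2 (n k : ℕ) (row : List String) : List String :=
  (row.set k (" * " ++ "\x1b[94m")).set (n-1-k) (" * " ++ "\x1b[94m")

-- B's row j as a map over columns (Nat-indexed)
def pvRowB (length : Int) (n j : ℕ) : List String :=
  (List.range n).map (fun k : ℕ => pvCellB length (j : Int) (k : Int))

-- indexing a comprehension over range' (general f, so no cast normalisation interferes)
theorem pv_getElem_map_range' {α : Type} (f : ℕ → α) (n k : ℕ)
    (h : k < ((List.range' 0 n).map f).length) : ((List.range' 0 n).map f)[k] = f k := by
  simp

-- indexing a comprehension over range (general f, so no cast normalisation interferes)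
theorem pv_getElem_map_range {α : Type} (f : ℕ → α) (n k : ℕ)
    (h : k < ((List.range n).map f).length) : ((List.range n).map f)[k] = f k := by
  simp

-- a fold whose step replaces exactly index k of the accumulator preserves the length
theorem pv_foldl_set_len {α : Type} (step : List α → ℕ → List α) (g : ℕ → α → α) (d : α)
    (n0 : ℕ)
    (hstep : ∀ (b : List α) (k : ℕ), b.length = n0 → k < n0 → step b k = b.set k (g k (b.getD k d))) :
    ∀ (m a : ℕ) (b : List α), b.length = n0 → a + m ≤ n0 →
      ((List.range' a m).foldl step b).length = n0 := by
  intro m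
  induction m with
  | zero => intro a b hb _; simpa using hb
  | succ m ih =>
    intro a b hb h
    rw [List.range'_succ, List.foldl_cons, hstep b a hb (by omega)]
    exact ih (a+1) _ (by simp [hb]) (by omega)

-- … and its entry j ends up as g j (b[j]) for j in the fold's range, untouched outside
theorem pv_foldl_set_getD {α : Type} (step : List α → ℕ → List α) (g : ℕ → α → α) (d : α)
    (n0 : ℕ)
    (hstep : ∀ (b : List α) (k : ℕ), b.length = n0 → k < n0 → step b k = b.set k (g k (b.getD k d))) :
    ∀ (m a : ℕ) (b : List α), b.length = n0 → a + m ≤ n0 → ∀ (j : ℕ), j < n0 →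
      ((List.range' a m).foldl step b).getD j d =
        if a ≤ j ∧ j < a + m then g j (b.getD j d) else b.getD j d := by
  intro m
  induction m with
  | zero =>
    intro a b hb _ j hj
    rw [if_neg (by omega)]
    simp [List.range']
  | succ m ih =>
    intro a b hb h j hj
    rw [List.range'_succ, List.foldl_cons, hstep b a hb (by omega)]
    rw [ih (a+1) _ (by simp [hb]) (by omega) j hj]
    have hset : (b.set a (g a (b.getD a d))).getD j d =
        if j = a then g a (b.getD a d) else b.getD j d := by
      by_cases hja : j = a
      · subst hja; rw [if_pos rfl]
        simp [List.getD_eq_getElem?_getD, hb.symm ▸ hj]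
      · rw [if_neg hja]
        simp [List.getD_eq_getElem?_getD, List.getElem?_set_ne (by omega : a ≠ j)]
    rw [hset]
    by_cases hja : j = a
    · subst hja
      rw [if_neg (by omega), if_pos rfl, if_pos (by omega)]
    · rw [if_neg hja]
      by_cases hr : a + 1 ≤ j ∧ j < a + 1 + m
      · rw [if_pos hr, if_pos (by omega)]
      · rw [if_neg hr, if_neg (by omega)]

theorem pv_stepA1_eq (length : Int) (n : ℕ) (hn : (n : Int) = length) (h1 : 1 ≤ length) :
    ∀ (b : List (List String)) (k : ℕ), b.length = n → k < n →
      pvStepA1 length b (k : Int) = b.set k (pvG1 n (b.getD k [])) := by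
  intro b k hb hk
  unfold pvStepA1 pvG1
  dsimp only
  rw [PySem.List.pySetD_of_nonneg _ _ (by omega : (0:Int) ≤ length - 1)]
  have ht : (length - 1).toNat = n - 1 := by omega
  rw [ht]
  have h0 : ∀ (row : List String) (v : String), PySem.List.pySetD row (0:Int) v = row.set 0 v :=
    fun row v => by simp [pysem]
  simp only [pysem, h0]
  have hget : (b.set k ((b.getD k []).set 0 ("\x1b[94m" ++ " * "))).getD k [] =
      (b.getD k []).set 0 ("\x1b[94m" ++ " * ") := by
    simp [List.getD_eq_getElem?_getD, hb.symm ▸ hk]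
  rw [hget, List.set_set]

theorem pv_stepA2_eq (length : Int) (n : ℕ) (hn : (n : Int) = length) (h1 : 1 ≤ length) :
    ∀ (b : List (List String)) (k : ℕ), b.length = n → k < n →
      pvStepA2 length b (k : Int) = b.set k (pvG2 n k (b.getD k [])) := by
  intro b k hb hk
  unfold pvStepA2 pvG2
  dsimp only
  rw [PySem.List.pySetD_of_nonneg _ _ (by omega : (0:Int) ≤ length - 1 - (k:Int))]
  have ht : (length - 1 - (k:Int)).toNat = n - 1 - k := by omega
  rw [ht]
  simp only [pysem]
  have hget : (b.set k ((b.getD k []).set k (" * " ++ "\x1b[94m"))).getD k [] =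
      (b.getD k []).set k (" * " ++ "\x1b[94m") := by
    simp [List.getD_eq_getElem?_getD, hb.symm ▸ hk]
  rw [hget, List.set_set]

-- A's finished row j equals B's closed-form row
theorem pv_rowA_eq_rowB (length : Int) (n : ℕ) (hn : (n : Int) = length)
    (j : ℕ) (hj : j < n) :
    pvG2 n j (pvG1 n (List.replicate n "   ")) = pvRowB length n j := by
  apply List.ext_getElem
  · simp [pvG1, pvG2, pvRowB]
  · intro k hk1 hk2
    have hkn : k < n := by
      have := hk1
      simp only [pvG1, pvG2, List.length_set, List.length_replicate] at this
      exact this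
    simp only [pvRowB]
    rw [pv_getElem_map_range (fun k : ℕ => pvCellB length (j : Int) (k : Int)) n k]
    show _ = pvCellB length (j : Int) (k : Int)
    unfold pvCellB
    simp only [pvG1, pvG2, List.getElem_set, List.getElem_replicate]
    split_ifs <;> first | rfl | omega

-- B's rows are vertically symmetric: row j = row (n-1-j)
theorem pv_rowB_symm (length : Int) (n : ℕ) (hn : (n : Int) = length)
    (j : ℕ) (hj : j < n) :
    pvRowB length n j = pvRowB length n (n - 1 - j) := by
  unfold pvRowB
  have hf : (fun k : ℕ => pvCellB length (j : Int) (k : Int)) =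
      (fun k : ℕ => pvCellB length ((n - 1 - j : ℕ) : Int) (k : Int)) := by
    funext k
    unfold pvCellB
    split_ifs <;> first | rfl | omega
  rw [hf]

-- mirroring: a vertically symmetric board is its top half plus the reversed strict top half
theorem pv_mirror {α : Type} (n : ℕ) (row : ℕ → α)
    (hsym : ∀ j, j < n → row j = row (n - 1 - j)) :
    (List.range n).map row =
      (List.range ((n+1)/2)).map row ++ (((List.range ((n+1)/2)).map row).take (n/2)).reverse := by
  have hle : n/2 ≤ (n+1)/2 := by omega
  have h1 : ((List.range ((n+1)/2)).map row).take (n/2) = (List.range (n/2)).map row := by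
    rw [← List.map_take, List.take_range, Nat.min_eq_left hle]
  rw [h1]
  apply List.ext_getElem
  · simp; omega
  · intro j hj1 hj2
    have hjn : j < n := by simpa using hj1
    rw [pv_getElem_map_range row n j]
    by_cases hc : j < (n+1)/2
    · rw [List.getElem_append_left (by simpa using hc)]
      rw [pv_getElem_map_range row ((n+1)/2) j]
    · push_neg at hc
      rw [List.getElem_append_right (by simpa using hc)]
      rw [List.getElem_reverse]
      rw [pv_getElem_map_range row (n/2) _]
      rw [hsym j hjn]
      congr 1
      simp only [List.length_map, List.length_range]
      omega

theorem pv_main (length : Int) : draw_bow length = draw_bow_alt length := by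
  by_cases hle : length ≤ 0
  · have hf : PySem.Int.floordiv (length + 1) 2 ≤ 0 := by
      have := (PySem.Int.floordiv_lt_iff_lt_mul (a := length + 1) (b := 2) (q := 1)
        (by omega)).mpr (by omega)
      omega
    simp only [draw_bow, draw_bow_alt, PySem.List.pyRange_one_eq_nil hle,
      PySem.List.pyRange_one_eq_nil hf, Int.toNat_of_nonpos hle, List.map_nil,
      List.foldl_nil, List.replicate_zero, List.nil_append]
    simp [PySem.List.slice]
  · push_neg at hle
    have h1 : (1:Int) ≤ length := by omega
    have hn : ((length.toNat : ℕ) : Int) = length := Int.toNat_of_nonneg (by omega)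
    set n := length.toNat with hndef
    -- B side: rewrite draw_bow_alt into the mirrored map form
    have hfd1 : PySem.Int.floordiv (length + 1) 2 = (((n+1)/2 : ℕ) : Int) := by
      have h : length + 1 = (((n+1 : ℕ)) : Int) := by omega
      rw [h]
      exact_mod_cast PySem.Int.floordiv_natCast (n+1) 2
    have hfd2 : PySem.Int.floordiv length 2 = (((n/2 : ℕ)) : Int) := by
      rw [← hn]
      exact_mod_cast PySem.Int.floordiv_natCast n 2
    have halt : draw_bow_alt length =
        (List.range ((n+1)/2)).map (pvRowB length n) ++
          (((List.range ((n+1)/2)).map (pvRowB length n)).take (n/2)).reverse := by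
      unfold draw_bow_alt
      dsimp only
      rw [hfd1, hfd2, PySem.List.slice_to_natCast]
      have htop : (PySem.List.pyRange 0 (((n+1)/2 : ℕ) : Int) 1).map
          (fun i => (PySem.List.pyRange 0 length 1).map (fun j => pvCellB length i j)) =
          (List.range ((n+1)/2)).map (pvRowB length n) := by
        simp only [PySem.List.pyRange_one, sub_zero, zero_add, Int.toNat_natCast,
          List.map_map, Function.comp_def]
        rw [← hn]
        simp only [Int.toNat_natCast]
        first
          | rfl
          | (apply List.map_congr_left; intro i _; simp only [pvRowB])
      rw [htop]
    rw [halt, ← pv_mirror n (pvRowB length n) (pv_rowB_symm length n hn)]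
    -- A side
    have hr : PySem.List.pyRange 0 length 1 = (List.range n).map (fun k : ℕ => (k:Int)) := by
      rw [PySem.List.pyRange_one]
      simp [hndef]
    have hstep1 := pv_stepA1_eq length n hn h1
    have hstep2 := pv_stepA2_eq length n hn h1
    unfold draw_bow
    rw [hr]
    simp only [List.foldl_map]
    rw [List.range_eq_range']
    have hb0 : (List.replicate n (List.replicate n "   ")).length = n := by simp
    have hlen1 := pv_foldl_set_len (fun b k => pvStepA1 length b (k:Int)) (fun k row => pvG1 n row)
      [] n hstep1 n 0 _ hb0 (by omega)
    have hlen2 := pv_foldl_set_len (fun b k => pvStepA2 length b (k:Int)) (pvG2 n)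
      [] n hstep2 n 0 _ hlen1 (by omega)
    apply List.ext_getElem
    · simpa using hlen2
    · intro j hj1 hj2
      have hjn : j < n := by rwa [hlen2] at hj1
      rw [← List.getD_eq_getElem (d := ([] : List String)) _ hj1]
      rw [pv_foldl_set_getD (fun b k => pvStepA2 length b (k:Int)) (pvG2 n) [] n hstep2
            n 0 _ hlen1 (by omega) j hjn, if_pos (by omega)]
      rw [pv_foldl_set_getD (fun b k => pvStepA1 length b (k:Int)) (fun k row => pvG1 n row)
            [] n hstep1 n 0 _ hb0 (by omega) j hjn, if_pos (by omega)]
      have hrep : (List.replicate n (List.replicate n "   ")).getD j [] = List.replicate n "   " := by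
        simp [List.getD_eq_getElem?_getD, hjn]
      rw [hrep, pv_getElem_map_range' (pvRowB length n) n j]
      exact pv_rowA_eq_rowB length n hn j hjn

-- ===== VERDICT (by name: the statement is the Claim_ definition above) =====
theorem draw_bow_spec : Claim_equal_draw_bow := by
  intro length _
  unfold Spec_draw_bow
  exact pv_main length
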